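-- pv_equiv track=rewrite | github.com/blevinstein/adventofcode | 2020/20/part2.py | mirror_fingerprint
-- ===== SOURCE A (Python) =====
-- TOP = 0
--
-- RIGHT = 1
--
-- BOTTOM = 2
--
-- LEFT = 3
--
-- def mirror_fingerprint(fingerprint, length):
--   flipped_values = [flip_bitstring(value, length) for value in fingerprint]
--   return [
--       flipped_values[BOTTOM],
--       flipped_values[RIGHT],
--       flipped_values[TOP],
--       flipped_values[LEFT]
--   ]
--
-- def flip_bitstring(value, length):
--   return sum(1 << (length-i-1) for i in range(length) if value & (1 << i) > 0)
-- ===== SOURCE B (Python) =====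
-- TOP = 0
--
-- RIGHT = 1
--
-- BOTTOM = 2
--
-- LEFT = 3
--
-- REV4 = [0, 8, 4, 12, 2, 10, 6, 14, 1, 9, 5, 13, 3, 11, 7, 15]
--
-- def mirror_fingerprint(fingerprint, length):
--   top, right, bottom, left = fingerprint[:4]
--   return [
--       reverse_bits(bottom, length),
--       reverse_bits(right, length),
--       reverse_bits(top, length),
--       reverse_bits(left, length),
--   ]
--
-- def reverse_bits(value, length):
--   result = 0
--   remaining = length
--   while remaining >= 4:
--     result = (result << 4) | REV4[value & 15]
--     value >>= 4
--     remaining -= 4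
--   if remaining > 0:
--     result = (result << remaining) | (REV4[value & ((1 << remaining) - 1)] >> (4 - remaining))
--   return result
-- ===== Notes on version B (the rewrite author's own statement) =====
-- stated objective: faster
-- what changed: B slices out only the four edges it returns (instead of flipping every fingerprint entry) and reverses each value four bits at a time via a precomputed 16-entry nibble-reversal table (shift in REV4[value & 15] per iteration, with a table-lookup tail for the last length%4 bits), instead of A's per-bit scatter sum over all length positions.
import Mathlib
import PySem

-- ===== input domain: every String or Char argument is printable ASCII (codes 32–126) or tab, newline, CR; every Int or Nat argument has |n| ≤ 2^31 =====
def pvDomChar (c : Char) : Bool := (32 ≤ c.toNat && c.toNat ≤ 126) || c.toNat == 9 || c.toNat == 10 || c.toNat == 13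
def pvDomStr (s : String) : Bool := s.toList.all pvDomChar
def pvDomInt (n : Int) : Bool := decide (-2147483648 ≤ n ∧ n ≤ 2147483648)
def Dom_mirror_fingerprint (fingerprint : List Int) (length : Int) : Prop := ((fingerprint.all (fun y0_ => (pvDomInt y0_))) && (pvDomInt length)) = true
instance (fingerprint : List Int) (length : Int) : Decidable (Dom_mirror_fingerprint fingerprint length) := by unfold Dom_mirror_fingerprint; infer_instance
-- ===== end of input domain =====

-- B slices out only the four edges it returns and reverses each value FOUR BITS AT A TIME via a
-- precomputed 16-entry nibble-reversal table (with a table-lookup tail for the last length%4 bits),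
-- instead of A's per-bit scatter sum over every entry of the fingerprint (objective: faster).

-- ===== PORT A =====
-- module constants TOP = 0, RIGHT = 1, BOTTOM = 2, LEFT = 3 are inlined as the numerals below
def flip_bitstring (value length : Int) : Int :=
  (((PySem.List.pyRange 0 length 1).filter
      (fun i => decide (PySem.Int.band value ((1 : Int) <<< i.toNat) > 0))).map
    (fun i => (1 : Int) <<< (length - i - 1).toNat)).sum

def mirror_fingerprint (fingerprint : List Int) (length : Int) : List Int :=
  let flipped_values := fingerprint.map (fun value => flip_bitstring value length)
  [PySem.List.pyGetD flipped_values 2 0,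
   PySem.List.pyGetD flipped_values 1 0,
   PySem.List.pyGetD flipped_values 0 0,
   PySem.List.pyGetD flipped_values 3 0]

-- ===== PORT B =====
def REV4 : List Int := [0, 8, 4, 12, 2, 10, 6, 14, 1, 9, 5, 13, 3, 11, 7, 15]

-- the `while remaining >= 4` loop of Source B's reverse_bits; state = (result, value, remaining)
def rev_loop (result value remaining : Int) : Int × Int × Int :=
  if h : 4 ≤ remaining then
    rev_loop (PySem.Int.bor (result <<< (4 : Nat)) (PySem.List.pyGetD REV4 (PySem.Int.band value 15) 0))
             (value >>> (4 : Nat)) (remaining - 4)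
  else (result, value, remaining)
termination_by remaining.toNat
decreasing_by omega

def reverse_bits (value length : Int) : Int :=
  let st := rev_loop 0 value length
  if 0 < st.2.2 then
    PySem.Int.bor (st.1 <<< st.2.2.toNat)
      ((PySem.List.pyGetD REV4 (PySem.Int.band st.2.1 (((1 : Int) <<< st.2.2.toNat) - 1)) 0)
        >>> ((4 : Int) - st.2.2).toNat)
  else st.1

def mirror_fingerprint_alt (fingerprint : List Int) (length : Int) : List Int :=
  match PySem.List.slice fingerprint none (some 4) with
  | [top, right, bottom, left] =>
      [reverse_bits bottom length, reverse_bits right length,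
       reverse_bits top length, reverse_bits left length]
  | _ => []  -- the tuple unpacking in Source B raises ValueError here (outside Pre_)

-- ===== PRECONDITION & SPEC =====
-- A raises IndexError when the fingerprint has fewer than 4 entries (it indexes 0..3).
def Pre_mirror_fingerprint (fingerprint : List Int) (length : Int) : Prop :=
  4 ≤ fingerprint.length
instance (fingerprint : List Int) (length : Int) : Decidable (Pre_mirror_fingerprint fingerprint length) := by unfold Pre_mirror_fingerprint; infer_instance

def pvWitness_mirror_fingerprint : List Int × Int := ([9, 2, 5, 12], 4)

def Spec_mirror_fingerprint (fingerprint : List Int) (length : Int) (out : List Int) : Prop := out = mirror_fingerprint_alt fingerprint length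
instance (fingerprint : List Int) (length : Int) (out : List Int) : Decidable (Spec_mirror_fingerprint fingerprint length out) := by unfold Spec_mirror_fingerprint; infer_instance

-- ===== CLAIM (what is proved, stated in full; the proofs are below) =====
def Claim_equal_mirror_fingerprint : Prop := ∀ (fingerprint : List Int) (length : Int), Dom_mirror_fingerprint fingerprint length → Pre_mirror_fingerprint fingerprint length → Spec_mirror_fingerprint fingerprint length (mirror_fingerprint fingerprint length)

-- ===== LEMMAS AND PROOFS =====

-- reference function: bit-reversal of the low m bits, consuming the low bit first
def pvR : Int → Nat → Int
  | _, 0 => 0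
  | v, m + 1 => PySem.Int.mod v 2 * 2 ^ m + pvR (PySem.Int.floordiv v 2) m

lemma pv_band_two_pow (v : Int) (k : Nat) :
    PySem.Int.band v (2 ^ k) = if v.testBit k then 2 ^ k else 0 := by
  have h2 : ((2 : Int) ^ k) = ((2 ^ k : Nat) : Int) := by push_cast; ring
  cases v with
  | ofNat m =>
    rw [h2]
    unfold PySem.Int.band
    rw [if_pos (show (0 : Int) ≤ Int.ofNat m from Int.natCast_nonneg m),
        if_pos (Int.natCast_nonneg _)]
    rw [show (Int.ofNat m).toNat = m from rfl, Int.toNat_natCast, Nat.and_two_pow]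
    cases h : m.testBit k <;> simp [Int.testBit, h]
  | negSucc m =>
    rw [h2]
    unfold PySem.Int.band
    rw [if_neg (not_le.mpr (Int.negSucc_lt_zero m)), if_pos (Int.natCast_nonneg _)]
    rw [Int.toNat_natCast,
        show (-Int.negSucc m - 1).toNat = m by rw [Int.negSucc_eq]; omega,
        Nat.and_comm, Nat.and_two_pow]
    cases h : m.testBit k <;> simp [Int.testBit, h]

lemma pv_band_pos_iff (v : Int) (k : Nat) :
    (0 < PySem.Int.band v (2 ^ k)) ↔ v.testBit k = true := by
  rw [pv_band_two_pow]
  cases h : v.testBit k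
  · simp
  · simp [pow_pos (show (0:Int) < 2 by norm_num) k]

lemma pv_testBit_succ (v : Int) (i : Nat) :
    v.testBit (i + 1) = (PySem.Int.floordiv v 2).testBit i := by
  cases v with
  | ofNat m =>
    have h : PySem.Int.floordiv (Int.ofNat m) 2 = Int.ofNat (m / 2) := by
      unfold PySem.Int.floordiv
      rw [Int.fdiv_eq_ediv]
      have : Int.ofNat m = (m : Int) := rfl
      rw [this]
      norm_num
    rw [h]
    simp [Int.testBit, Nat.testBit_succ]
  | negSucc m =>
    have h : PySem.Int.floordiv (Int.negSucc m) 2 = Int.negSucc (m / 2) := by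
      unfold PySem.Int.floordiv
      rw [Int.fdiv_eq_ediv]
      rw [Int.negSucc_eq, Int.negSucc_eq]
      norm_num
      omega
    rw [h]
    simp [Int.testBit, Nat.testBit_succ]

lemma pv_mod_two_testBit (v : Int) : PySem.Int.mod v 2 = if v.testBit 0 then 1 else 0 := by
  have h : PySem.Int.mod v 2 = v % 2 := by
    unfold PySem.Int.mod
    rw [Int.fmod_eq_emod]
    norm_num
  rw [h]
  cases v with
  | ofNat m =>
    simp only [Int.testBit, Nat.testBit_zero]
    by_cases hm : m % 2 = 1
    · rw [if_pos (by simpa using hm)]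
      have : Int.ofNat m = (m : Int) := rfl
      rw [this]; omega
    · rw [if_neg (by simpa using hm)]
      have : Int.ofNat m = (m : Int) := rfl
      rw [this]; omega
  | negSucc m =>
    simp only [Int.testBit, Nat.testBit_zero]
    by_cases hm : m % 2 = 1
    · rw [if_neg (by simp [hm])]
      rw [Int.negSucc_eq]; omega
    · rw [if_pos (by simp [hm])]
      rw [Int.negSucc_eq]; omega

lemma pv_Asum (m : Nat) (v : Int) :
    (((List.range m).filter (fun k => decide (0 < PySem.Int.band v ((2 : Int) ^ k)))).map
      (fun k => (2 : Int) ^ (m - 1 - k))).sum = pvR v m := by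
  induction m generalizing v with
  | zero => simp [pvR]
  | succ m ih =>
    rw [List.range_succ_eq_map, pvR]
    have hcond : (fun k => decide (0 < PySem.Int.band v ((2 : Int) ^ k))) ∘ Nat.succ
        = fun k => decide (0 < PySem.Int.band (PySem.Int.floordiv v 2) ((2 : Int) ^ k)) := by
      funext k
      simp only [Function.comp]
      congr 1
      rw [eq_iff_iff, pv_band_pos_iff, pv_band_pos_iff, Nat.succ_eq_add_one, pv_testBit_succ]
    have hexp : (fun k => (2 : Int) ^ (m + 1 - 1 - k)) ∘ Nat.succ = fun k => (2 : Int) ^ (m - 1 - k) := by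
      funext k; simp only [Function.comp_apply]; congr 1; omega
    have hb1 : (0 < PySem.Int.band v 1) ↔ v.testBit 0 = true := by
      simpa using pv_band_pos_iff v 0
    by_cases h0 : v.testBit 0
    · rw [List.filter_cons_of_pos (by simpa using hb1.mpr h0)]
      rw [List.map_cons, List.sum_cons, List.filter_map, hcond, List.map_map]
      rw [hexp, ih, pv_mod_two_testBit, if_pos h0]
      have h1 : m + 1 - 1 - 0 = m := by omega
      rw [h1]; ring
    · rw [List.filter_cons_of_neg (by simp [hb1, h0])]
      rw [List.filter_map, hcond, List.map_map]
      rw [hexp, ih, pv_mod_two_testBit, if_neg h0]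
      ring

lemma pv_Aside (v n : Int) : flip_bitstring v n = pvR v n.toNat := by
  unfold flip_bitstring
  rw [PySem.List.pyRange_one]
  simp only [sub_zero]
  rw [List.filter_map, List.map_map]
  have hc : (fun i => decide (PySem.Int.band v ((1 : Int) <<< i.toNat) > 0)) ∘ (fun k : Nat => (0 : Int) + k)
      = fun k => decide (0 < PySem.Int.band v ((2 : Int) ^ k)) := by
    funext k
    simp [Int.shiftLeft_eq_mul_pow]
  rw [hc, ← pv_Asum n.toNat v]
  refine congrArg List.sum ?_
  apply List.map_congr_left
  intro k hk
  have hk' : k < n.toNat := List.mem_range.mp (List.mem_filter.mp hk).1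
  simp only [Function.comp_apply, zero_add]
  have he : (n - (k : Int) - 1).toNat = n.toNat - 1 - k := by omega
  rw [he, Int.shiftLeft_eq, one_mul]

-- ----- B-side lemmas -----

lemma pv_pvR_bounds (v : Int) (m : Nat) : 0 ≤ pvR v m ∧ pvR v m < 2 ^ m := by
  induction m generalizing v with
  | zero => simp [pvR]
  | succ m ih =>
    obtain ⟨h0, h1⟩ := ih (PySem.Int.floordiv v 2)
    have hm0 : 0 ≤ PySem.Int.mod v 2 := PySem.Int.mod_nonneg _ (by norm_num)
    have hm1 : PySem.Int.mod v 2 < 2 := PySem.Int.mod_lt _ (by norm_num)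
    constructor
    · have : 0 ≤ PySem.Int.mod v 2 * 2 ^ m := by positivity
      simp only [pvR]; omega
    · simp only [pvR, pow_succ]
      nlinarith [pow_pos (show (0:Int) < 2 by norm_num) m]

-- Python's  value & (2^r - 1)  =  value % 2^r,  instantiated at the four masks B uses
lemma pv_band_mask (v : Int) (r : Nat) :
    PySem.Int.band v ((2 : Int) ^ r - 1) = PySem.Int.mod v ((2 : Int) ^ r) := by
  have hpow : ((2 : Int) ^ r) = ((2 ^ r : Nat) : Int) := by push_cast; ring
  have hposN : 0 < 2 ^ r := Nat.two_pow_pos r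
  rw [PySem.Int.mod_eq_emod_of_pos (by positivity)]
  have hone : (0 : Int) ≤ 2 ^ r - 1 := by rw [hpow]; have := hposN; omega
  have htn : ((2 : Int) ^ r - 1).toNat = 2 ^ r - 1 := by rw [hpow]; have := hposN; omega
  cases v with
  | ofNat m =>
    unfold PySem.Int.band
    rw [if_pos (show (0 : Int) ≤ Int.ofNat m from Int.natCast_nonneg m), if_pos hone]
    rw [show (Int.ofNat m).toNat = m from rfl, htn, Nat.and_two_pow_sub_one_eq_mod]
    rw [hpow, show (Int.ofNat m) = (m : Int) from rfl]
    norm_cast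
  | negSucc m =>
    unfold PySem.Int.band
    rw [if_neg (not_le.mpr (Int.negSucc_lt_zero m)), if_pos hone]
    rw [htn,
        show (-Int.negSucc m - 1).toNat = m by rw [Int.negSucc_eq]; omega,
        Nat.and_comm, Nat.and_two_pow_sub_one_eq_mod]
    -- goal: ↑(2^r - 1 - m % 2^r) = Int.negSucc m % 2^r
    rw [Int.negSucc_eq, hpow]
    have hs : m % 2 ^ r < 2 ^ r := Nat.mod_lt _ hposN
    have hqm : (m : Int) = ((2 ^ r : Nat) : Int) * ((m / 2 ^ r : Nat) : Int) + ((m % 2 ^ r : Nat) : Int) := by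
      exact_mod_cast (Nat.div_add_mod m (2 ^ r)).symm
    have hcast : ((2 ^ r - 1 - m % 2 ^ r : Nat) : Int) = ((2 ^ r : Nat) : Int) - 1 - ((m % 2 ^ r : Nat) : Int) := by
      omega
    rw [hcast,
      show (-((m : Int) + 1)) = (((2 ^ r : Nat) : Int) - 1 - ((m % 2 ^ r : Nat) : Int))
          + (-((m / 2 ^ r : Nat) : Int) - 1) * ((2 ^ r : Nat) : Int) by linear_combination -hqm,
      Int.add_mul_emod_self_right]
    exact (Int.emod_eq_of_lt (by omega) (by omega)).symm

-- pvR reads only the low m bits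
lemma pv_pvR_mod (v : Int) (m : Nat) : pvR (PySem.Int.mod v ((2 : Int) ^ m)) m = pvR v m := by
  induction m generalizing v with
  | zero => simp [pvR]
  | succ m ih =>
    have hP : (0 : Int) < 2 ^ m := by positivity
    have hM : (0 : Int) < 2 ^ (m + 1) := by positivity
    simp only [pvR]
    rw [PySem.Int.mod_eq_emod_of_pos hM]
    have e1 : PySem.Int.mod (v % 2 ^ (m + 1)) 2 = PySem.Int.mod v 2 := by
      rw [PySem.Int.mod_eq_emod_of_pos (by norm_num), PySem.Int.mod_eq_emod_of_pos (by norm_num)]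
      exact Int.emod_emod_of_dvd v ⟨2 ^ m, by ring⟩
    have e2 : PySem.Int.floordiv (v % 2 ^ (m + 1)) 2 = PySem.Int.mod (PySem.Int.floordiv v 2) ((2 : Int) ^ m) := by
      rw [PySem.Int.mod_eq_emod_of_pos hP, PySem.Int.floordiv_eq_ediv_of_pos (by norm_num), PySem.Int.floordiv_eq_ediv_of_pos (by norm_num)]
      have hv : v = 2 ^ (m + 1) * (v / 2 ^ (m + 1)) + v % 2 ^ (m + 1) := (Int.mul_ediv_add_emod v _).symm
      have hs0 : 0 ≤ v % 2 ^ (m + 1) := Int.emod_nonneg v (by positivity)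
      have hs1 : v % 2 ^ (m + 1) < 2 ^ (m + 1) := Int.emod_lt_of_pos v hM
      have hpw : (2 : Int) ^ (m + 1) = 2 * 2 ^ m := by ring
      have hd : v / 2 = v % 2 ^ (m + 1) / 2 + 2 ^ m * (v / 2 ^ (m + 1)) := by
        conv_lhs => rw [hv]
        rw [show (2 : Int) ^ (m + 1) * (v / 2 ^ (m + 1)) + v % 2 ^ (m + 1)
              = v % 2 ^ (m + 1) + 2 * (2 ^ m * (v / 2 ^ (m + 1))) by ring]
        rw [Int.add_mul_ediv_left _ _ (by norm_num : (2:Int) ≠ 0)]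
      rw [hd, Int.add_mul_emod_self_left]
      have hq0 : 0 ≤ v % 2 ^ (m + 1) / 2 := Int.ediv_nonneg hs0 (by norm_num)
      have hq1 : v % 2 ^ (m + 1) / 2 < 2 ^ m := by omega
      exact (Int.emod_eq_of_lt hq0 hq1).symm
    rw [e1, e2, ih (PySem.Int.floordiv v 2)]

-- Python's  value >> 4  is floor division by 16
lemma pv_shr4 (v : Int) : v >>> (4 : Nat) = PySem.Int.floordiv v 16 := by
  cases v with
  | ofNat m =>
    rw [show (Int.ofNat m) >>> (4 : Nat) = Int.ofNat (m >>> 4) from rfl]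
    unfold PySem.Int.floordiv
    rw [Int.fdiv_eq_ediv]
    rw [show Int.ofNat m = (m : Int) from rfl, Nat.shiftRight_eq_div_pow]
    norm_num
  | negSucc m =>
    rw [show (Int.negSucc m) >>> (4 : Nat) = Int.negSucc (m >>> 4) from rfl]
    unfold PySem.Int.floordiv
    rw [Int.fdiv_eq_ediv]
    rw [Int.negSucc_eq, Int.negSucc_eq, Nat.shiftRight_eq_div_pow]
    norm_num
    omega

-- or of a left-shift with a value fitting in the shifted-in zeros is addition
lemma pv_lor_add (a t : Int) (k : Nat) (ha : 0 ≤ a) (ht0 : 0 ≤ t) (ht : t < 2 ^ k) :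
    PySem.Int.bor (a <<< k) t = a * 2 ^ k + t := by
  lift a to Nat using ha with a'
  lift t to Nat using ht0 with t'
  have ht' : t' < 2 ^ k := by exact_mod_cast ht
  have hnat : a' <<< k ||| t' = a' * 2 ^ k + t' := by
    apply Nat.eq_of_testBit_eq; intro j
    rw [Nat.testBit_lor, Nat.testBit_shiftLeft, show a' * 2 ^ k + t' = 2 ^ k * a' + t' by ring,
        Nat.testBit_two_pow_mul_add a' ht']
    by_cases hj : j < k
    · simp [hj, Nat.not_le.mpr hj]
    · simp [hj, Nat.le_of_not_lt hj,
        Nat.testBit_lt_two_pow (lt_of_lt_of_le ht' (Nat.pow_le_pow_right (by norm_num) (Nat.le_of_not_lt hj)))]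
  rw [show ((a' : Int)) <<< k = ((a' <<< k : Nat) : Int) from rfl, PySem.Int.bor_natCast, hnat]
  push_cast; ring

-- the 16-entry table holds the 4-bit reversals
lemma pv_tab (t : Int) (h0 : 0 ≤ t) (h1 : t < 16) :
    PySem.List.pyGetD REV4 t 0 = pvR t 4 := by
  interval_cases t <;> decide

-- peel one nibble off a bit reversal
lemma pv_nib (v : Int) (m : Nat) :
    pvR v (m + 4) = pvR (v % 16) 4 * 2 ^ m + pvR (PySem.Int.floordiv v 16) m := by
  simp only [show m + 3 = m + 2 + 1 from rfl, show m + 2 = m + 1 + 1 from rfl, pvR]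
  simp only [PySem.Int.mod_eq_emod_of_pos (show (0:Int) < 2 by norm_num),
    PySem.Int.floordiv_eq_ediv_of_pos (show (0:Int) < 2 by norm_num),
    PySem.Int.floordiv_eq_ediv_of_pos (show (0:Int) < 16 by norm_num)]
  obtain ⟨b1, b2, b3, d⟩ :
      (v % 16) % 2 = v % 2 ∧ (v % 16) / 2 % 2 = v / 2 % 2 ∧
      (v % 16) / 2 / 2 % 2 = v / 2 / 2 % 2 ∧ (v % 16) / 2 / 2 / 2 % 2 = v / 2 / 2 / 2 % 2 := by
    refine ⟨by omega, by omega, by omega, by omega⟩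
  have hdv : v / 2 / 2 / 2 / 2 = v / 16 := by omega
  rw [b1, b2, b3, d, hdv]
  ring

-- the `if remaining:` tail of Source B's reverse_bits, for remaining in 1..3
lemma pv_tail (rem : Int) (hlo : 1 ≤ rem) (hhi : rem ≤ 3) (result value : Int) (hres : 0 ≤ result) :
    PySem.Int.bor (result <<< rem.toNat)
      ((PySem.List.pyGetD REV4 (PySem.Int.band value (((1 : Int) <<< rem.toNat) - 1)) 0)
        >>> ((4 : Int) - rem).toNat)
    = result * 2 ^ rem.toNat + pvR value rem.toNat := by
  interval_cases rem
  · -- rem = 1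
    rw [show ((1 : Int)).toNat = 1 from rfl, show ((1 : Int) <<< (1 : Nat)) - 1 = 1 by decide,
      show ((4 : Int) - 1).toNat = 3 by decide]
    have hband := pv_band_mask value 1
    norm_num at hband
    rw [hband]
    have ht0 : 0 ≤ value % 2 := Int.emod_nonneg value (by norm_num)
    have ht1 : value % 2 < 2 := Int.emod_lt_of_pos value (by norm_num)
    have htail : (PySem.List.pyGetD REV4 (value % 2) 0) >>> (3 : Nat) = pvR (value % 2) 1 := by
      set t := value % 2 with hts
      clear_value t
      interval_cases t <;> decide
    rw [htail]
    have hb := pv_pvR_bounds (value % 2) 1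
    rw [pv_lor_add result _ 1 hres hb.1 (by exact_mod_cast hb.2)]
    have hpm := pv_pvR_mod value 1
    norm_num at hpm
    rw [hpm]
  · -- rem = 2
    rw [show ((2 : Int)).toNat = 2 from rfl, show ((1 : Int) <<< (2 : Nat)) - 1 = 3 by decide,
      show ((4 : Int) - 2).toNat = 2 by decide]
    have hband := pv_band_mask value 2
    norm_num at hband
    rw [hband]
    have ht0 : 0 ≤ value % 4 := Int.emod_nonneg value (by norm_num)
    have ht1 : value % 4 < 4 := Int.emod_lt_of_pos value (by norm_num)
    have htail : (PySem.List.pyGetD REV4 (value % 4) 0) >>> (2 : Nat) = pvR (value % 4) 2 := by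
      set t := value % 4 with hts
      clear_value t
      interval_cases t <;> decide
    rw [htail]
    have hb := pv_pvR_bounds (value % 4) 2
    rw [pv_lor_add result _ 2 hres hb.1 (by exact_mod_cast hb.2)]
    have hpm := pv_pvR_mod value 2
    norm_num at hpm
    rw [hpm]
  · -- rem = 3
    rw [show ((3 : Int)).toNat = 3 from rfl, show ((1 : Int) <<< (3 : Nat)) - 1 = 7 by decide,
      show ((4 : Int) - 3).toNat = 1 by decide]
    have hband := pv_band_mask value 3
    norm_num at hband
    rw [hband]
    have ht0 : 0 ≤ value % 8 := Int.emod_nonneg value (by norm_num)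
    have ht1 : value % 8 < 8 := Int.emod_lt_of_pos value (by norm_num)
    have htail : (PySem.List.pyGetD REV4 (value % 8) 0) >>> (1 : Nat) = pvR (value % 8) 3 := by
      set t := value % 8 with hts
      clear_value t
      interval_cases t <;> decide
    rw [htail]
    have hb := pv_pvR_bounds (value % 8) 3
    rw [pv_lor_add result _ 3 hres hb.1 (by exact_mod_cast hb.2)]
    have hpm := pv_pvR_mod value 3
    norm_num at hpm
    rw [hpm]

-- main loop invariant: running Source B's loop+tail from (result, value, remaining)
-- yields result·2^remaining + reversal of value's low `remaining` bits
lemma pv_run : ∀ (n : Nat) (rem result value : Int), rem.toNat = n → 0 ≤ result →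
    (if 0 < (rev_loop result value rem).2.2 then
       PySem.Int.bor ((rev_loop result value rem).1 <<< (rev_loop result value rem).2.2.toNat)
         ((PySem.List.pyGetD REV4 (PySem.Int.band (rev_loop result value rem).2.1
             (((1 : Int) <<< (rev_loop result value rem).2.2.toNat) - 1)) 0)
           >>> ((4 : Int) - (rev_loop result value rem).2.2).toNat)
     else (rev_loop result value rem).1)
    = result * 2 ^ rem.toNat + pvR value rem.toNat := by
  intro n
  induction n using Nat.strong_induction_on with
  | _ n ih =>
    intro rem result value hn hres
    by_cases h4 : 4 ≤ rem
    · rw [rev_loop, dif_pos h4]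
      have h15 := pv_band_mask value 4
      norm_num at h15
      have hu0 : 0 ≤ value % 16 := Int.emod_nonneg value (by norm_num)
      have hu1 : value % 16 < 16 := Int.emod_lt_of_pos value (by norm_num)
      have hb := pv_pvR_bounds (value % 16) 4
      have hres' : PySem.Int.bor (result <<< (4 : Nat)) (PySem.List.pyGetD REV4 (PySem.Int.band value 15) 0)
          = result * 16 + pvR (value % 16) 4 := by
        rw [h15, pv_tab _ hu0 hu1, pv_lor_add result _ 4 hres hb.1 (by exact_mod_cast hb.2)]
        norm_num
      rw [hres',
        ih (rem - 4).toNat (by omega) (rem - 4) _ _ rfl (by nlinarith [hb.1, hb.2]),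
        pv_shr4]
      have hm : rem.toNat = (rem - 4).toNat + 4 := by omega
      rw [hm, pv_nib value ((rem - 4).toNat)]
      ring
    · rw [rev_loop, dif_neg h4]
      simp only
      by_cases hpos : 0 < rem
      · rw [if_pos hpos]
        exact pv_tail rem hpos (by omega) result value hres
      · rw [if_neg hpos]
        rw [show rem.toNat = 0 by omega]
        simp [pvR]

lemma pv_flip_eq (v n : Int) : flip_bitstring v n = reverse_bits v n := by
  rw [pv_Aside]
  unfold reverse_bits
  rw [pv_run n.toNat n 0 v rfl le_rfl]
  simp

-- ===== VERDICT (by name: the statement is the Claim_ definition above) =====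
theorem mirror_fingerprint_spec : Claim_equal_mirror_fingerprint := by
  intro fingerprint length _ hpre
  unfold Spec_mirror_fingerprint
  unfold Pre_mirror_fingerprint at hpre
  obtain ⟨a, b, c, d, rest, rfl⟩ : ∃ a b c d rest, fingerprint = a :: b :: c :: d :: rest := by
    match fingerprint, hpre with
    | a :: b :: c :: d :: rest, _ => exact ⟨a, b, c, d, rest, rfl⟩
  unfold mirror_fingerprint mirror_fingerprint_alt
  rw [PySem.List.slice_to _ (by norm_num)]
  have h1 : (2 : Int) ≤ (rest.length : Int) + 1 + 1 + 1 := by omega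
  have h2 : (0 : Int) ≤ (rest.length : Int) + 1 + 1 := by omega
  have h3 : (0 : Int) ≤ (rest.length : Int) + 1 + 1 + 1 := by omega
  have h4 : (3 : Int) ≤ (rest.length : Int) + 1 + 1 + 1 := by omega
  simp [PySem.List.pyGetD, PySem.List.pyGet?, PySem.List.pyIdx?, pv_flip_eq, h1, h2, h3, h4]
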